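-- pv_equiv track=rewrite | github.com/yangrq1018/ctppywrapper | generate_script/generate_trader_api_pyx.py | parse_param_list
-- ===== SOURCE A (Python) =====
-- def parse_param_list(param_list):
--     # split as a list of (type, name) tuples
--     param_list = [tuple(item.split(' ')) for item in param_list]
--
--     param_list_out = []
--     nReq = None
--     bIsLast = None
--
--     for type_, name in param_list:
--         if type_ == 'int':
--             nReq = {'type': 'int', 'name': 'nRequestID'}
--         elif type_ == 'bool':
--             bIsLast = {'type': 'cbool', 'name': 'bIsLast'}
--         else:
--             param_list_out.append({'type': type_, 'name': name})
--     return (param_list_out, nReq, bIsLast)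
-- ===== SOURCE B (Python) =====
-- def parse_param_list(param_list):
--     parsed = [tuple(item.split(' ')) for item in param_list]
--     param_list_out = [{'type': t, 'name': n} for t, n in parsed
--                       if t != 'int' and t != 'bool']
--     nReq = {'type': 'int', 'name': 'nRequestID'} if any(t == 'int' for t, _ in parsed) else None
--     bIsLast = {'type': 'cbool', 'name': 'bIsLast'} if any(t == 'bool' for t, _ in parsed) else None
--     return (param_list_out, nReq, bIsLast)
-- ===== Notes on version B (the rewrite author's own statement) =====
-- stated objective: simpler
-- what changed: Replaces A's single stateful categorizing loop (mutating an output list and two slot variables) with three independent passes: a filtering comprehension for the output list and two any() presence checks that exploit the fact that the int/bool entries always produce the same constant dicts.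
import Mathlib
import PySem

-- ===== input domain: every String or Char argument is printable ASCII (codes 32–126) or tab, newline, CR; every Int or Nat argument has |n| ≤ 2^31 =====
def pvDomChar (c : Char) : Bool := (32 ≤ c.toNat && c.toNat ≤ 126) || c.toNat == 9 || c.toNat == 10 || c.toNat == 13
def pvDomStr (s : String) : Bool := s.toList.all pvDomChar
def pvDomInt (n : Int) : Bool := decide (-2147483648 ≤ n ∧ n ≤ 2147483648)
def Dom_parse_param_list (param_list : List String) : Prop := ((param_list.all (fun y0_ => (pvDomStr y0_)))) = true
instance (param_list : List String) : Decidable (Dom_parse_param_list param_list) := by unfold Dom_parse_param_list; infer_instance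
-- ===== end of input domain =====

-- B replaces A's single stateful categorizing loop with a filtering comprehension plus two any() presence checks (objective: simpler).


-- ===== PORT A =====
-- item.split(' ') is PySem.Str.split? with the literal non-empty separator " ", so it is always some
-- and .getD [] never substitutes; the loop state is (param_list_out, nReq, bIsLast); the '| _ => st' branch is the
-- tuple-unpacking ValueError case, excluded by Pre_parse_param_list
def parse_param_list (param_list : List String) : (List (List (String × String))) × (Option (List (String × String))) × (Option (List (String × String))) :=
  let parsed := param_list.map (fun item => (PySem.Str.split? item " ").getD [])
  parsed.foldl
    (fun st p =>
      match p with
      | [type_, name] =>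
        if type_ = "int" then (st.1, some [("type", "int"), ("name", "nRequestID")], st.2.2)
        else if type_ = "bool" then (st.1, st.2.1, some [("type", "cbool"), ("name", "bIsLast")])
        else (st.1 ++ [[("type", type_), ("name", name)]], st.2.1, st.2.2)
      | _ => st)
    ([], none, none)

-- ===== PORT B =====
-- the tuple unpack '(t, n)' is ported as a length-2 check plus positional access; the
-- 'else none' / '&& …' failure branches are the tuple-unpacking ValueError cases, excluded by Pre_parse_param_list
def parse_param_list_alt (param_list : List String) : (List (List (String × String))) × (Option (List (String × String))) × (Option (List (String × String))) :=
  let parsed := param_list.map (fun item => (PySem.Str.split? item " ").getD [])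
  let param_list_out := parsed.filterMap (fun p =>
    if p.length = 2 then
      let t := p.getD 0 ""
      let n := p.getD 1 ""
      if t ≠ "int" ∧ t ≠ "bool" then some [("type", t), ("name", n)] else none
    else none)
  let nReq := if parsed.any (fun p => p.length == 2 && p.getD 0 "" == "int")
              then some [("type", "int"), ("name", "nRequestID")] else none
  let bIsLast := if parsed.any (fun p => p.length == 2 && p.getD 0 "" == "bool")
                 then some [("type", "cbool"), ("name", "bIsLast")] else none
  (param_list_out, nReq, bIsLast)

-- ===== PRECONDITION & SPEC =====
-- Pre_ excludes exactly the inputs on which Python A raises ValueError: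
-- an item that does not split on ' ' into exactly two parts cannot be unpacked as (type_, name)
def Pre_parse_param_list (param_list : List String) : Prop :=
  ∀ s ∈ param_list, ((PySem.Str.split? s " ").getD []).length = 2
instance (param_list : List String) : Decidable (Pre_parse_param_list param_list) := by unfold Pre_parse_param_list; infer_instance
def pvWitness_parse_param_list : List String := ["int a", "bool b", "Foo x"]
def Spec_parse_param_list (param_list : List String) (out : (List (List (String × String))) × (Option (List (String × String))) × (Option (List (String × String)))) : Prop := out = parse_param_list_alt param_list
instance (param_list : List String) (out : (List (List (String × String))) × (Option (List (String × String))) × (Option (List (String × String)))) : Decidable (Spec_parse_param_list param_list out) := by unfold Spec_parse_param_list; infer_instance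

-- ===== CLAIM (what is proved, stated in full; the proofs are below) =====
def Claim_equal_parse_param_list : Prop := ∀ (param_list : List String), Dom_parse_param_list param_list → Pre_parse_param_list param_list → Spec_parse_param_list param_list (parse_param_list param_list)

-- ===== LEMMAS AND PROOFS =====

-- the loop invariant: A's fold over well-formed (length-2) parsed items equals
-- "append the filtered items; set each flag iff the corresponding type occurs"
theorem pv_fold_eq (l : List (List String))
    (h : ∀ p ∈ l, p.length = 2)
    (out0 : List (List (String × String)))
    (r0 b0 : Option (List (String × String))) :
    l.foldl
      (fun st p =>
        match p with
        | [type_, name] =>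
          if type_ = "int" then (st.1, some [("type", "int"), ("name", "nRequestID")], st.2.2)
          else if type_ = "bool" then (st.1, st.2.1, some [("type", "cbool"), ("name", "bIsLast")])
          else (st.1 ++ [[("type", type_), ("name", name)]], st.2.1, st.2.2)
        | _ => st)
      (out0, r0, b0)
    = (out0 ++ l.filterMap (fun p =>
        if p.length = 2 then
          let t := p.getD 0 ""
          let n := p.getD 1 ""
          if t ≠ "int" ∧ t ≠ "bool" then some [("type", t), ("name", n)] else none
        else none),
       if l.any (fun p => p.length == 2 && p.getD 0 "" == "int")
       then some [("type", "int"), ("name", "nRequestID")] else r0,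
       if l.any (fun p => p.length == 2 && p.getD 0 "" == "bool")
       then some [("type", "cbool"), ("name", "bIsLast")] else b0) := by
  induction l generalizing out0 r0 b0 with
  | nil => simp
  | cons p tl ih =>
    have hp : p.length = 2 := h p (List.mem_cons_self)
    obtain ⟨t, n, rfl⟩ : ∃ t n, p = [t, n] := by
      match p, hp with
      | [t, n], _ => exact ⟨t, n, rfl⟩
    have htl : ∀ q ∈ tl, q.length = 2 := fun q hq => h q (List.mem_cons_of_mem _ hq)
    by_cases hint : t = "int"
    · subst hint
      simp [List.foldl_cons, ih htl]
    · by_cases hbool : t = "bool"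
      · subst hbool
        simp [List.foldl_cons, ih htl]
      · simp [List.foldl_cons, hint, hbool, ih htl]

-- ===== VERDICT (by name: the statement is the Claim_ definition above) =====
theorem parse_param_list_spec : Claim_equal_parse_param_list := by
  intro pl _ hpre
  unfold Spec_parse_param_list parse_param_list parse_param_list_alt
  have h : ∀ p ∈ pl.map (fun item => (PySem.Str.split? item " ").getD []), p.length = 2 := by
    intro p hp
    obtain ⟨s, hs, rfl⟩ := List.mem_map.mp hp
    exact hpre s hs
  simp only []
  rw [pv_fold_eq _ h]
  simp
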